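-- pv_equiv track=rewrite | github.com/PraiseTheDotNet/Python | lab2/task2.py | calc_without_regex
-- ===== SOURCE A (Python) =====
-- def calc_without_regex(input: str):
--     sum = 0
--     start: int = -1
--     for i in range(len(input) + 1):
--         if i < len(input) and (input[i].isdigit() and start == -1):
--             start = i
--         elif i == len(input) or (start != -1 and not input[i].isdigit()):
--             coef = 1
--             if start > 0 and input[start-1] == '-':
--                 coef = -1
--             sum += coef * int(input[start:i])
--             start = -1
--     return sum
-- ===== SOURCE B (Python) =====
-- def calc_without_regex(input: str):
--     total = 0
--     buf = ''
--     sign = 1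
--     for i, ch in enumerate(input):
--         if ch.isdigit():
--             if not buf:
--                 sign = -1 if i > 0 and input[i - 1] == '-' else 1
--             buf += ch
--         elif buf:
--             total += sign * int(buf)
--             buf = ''
--     return total + sign * int(buf)
-- ===== Notes on version B (the rewrite author's own statement) =====
-- stated objective: simpler
-- what changed: A scans indices 0..len with a start-index sentinel (start = -1), re-slices the input at every flush and needs a phantom iteration at i == len; B keeps a running token buffer and the current sign, flushing sign*int(buf) at each run end and once after the loop, with no sentinel, no slicing and no extra iteration.
import Mathlib
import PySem

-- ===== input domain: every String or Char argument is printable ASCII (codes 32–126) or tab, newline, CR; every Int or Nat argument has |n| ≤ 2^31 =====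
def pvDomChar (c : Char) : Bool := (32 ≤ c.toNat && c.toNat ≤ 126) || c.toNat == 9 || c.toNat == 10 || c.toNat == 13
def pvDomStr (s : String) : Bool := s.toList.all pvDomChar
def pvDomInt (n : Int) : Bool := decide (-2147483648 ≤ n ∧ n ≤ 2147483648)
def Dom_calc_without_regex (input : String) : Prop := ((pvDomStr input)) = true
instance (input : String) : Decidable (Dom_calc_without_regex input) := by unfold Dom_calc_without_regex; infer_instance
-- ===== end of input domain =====

-- B replaces A's sentinel-index-and-slice scan (start = -1 over range(len+1), re-slicing the
-- input at each flush) by a running token buffer with the sign tracked at run start and one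
-- post-loop flush; objective: simpler state, no index arithmetic, same cost.


-- ===== PORT A =====
-- One iteration of A's 'for i in range(len(input) + 1)' over the state (sum, start).
def pvAStep (cs : List Char) (n : Int) (st : Int × Int) (i : Int) : Int × Int :=
  if i < n ∧ (PySem.Chars.isdigit (PySem.List.pyGetD cs i ' ') = true ∧ st.2 = -1) then
    (st.1, i)
  else if i = n ∨ (st.2 ≠ -1 ∧ ¬ PySem.Chars.isdigit (PySem.List.pyGetD cs i ' ') = true) then
    let coef : Int := if st.2 > 0 ∧ PySem.List.pyGetD cs (st.2 - 1) ' ' = '-' then -1 else 1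
    (st.1 + coef * (PySem.Int.ofChars? (PySem.List.slice cs (some st.2) (some i))).getD 0, -1)
  else st

def calc_without_regex (input : String) : Int :=
  let cs := input.toList
  let n := PySem.Str.len input
  ((PySem.List.pyRange 0 (n + 1) 1).foldl (pvAStep cs n) (0, -1)).1

-- ===== PORT B =====
-- One iteration of B's 'for i, ch in enumerate(input)' over the state (total, buf, sign).
def pvBStep (cs : List Char) (st : Int × List Char × Int) (p : Int × Char) : Int × List Char × Int :=
  if PySem.Chars.isdigit p.2 = true then
    let sign := if st.2.1 = [] then
        (if p.1 > 0 ∧ PySem.List.pyGetD cs (p.1 - 1) ' ' = '-' then (-1 : Int) else 1)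
      else st.2.2
    (st.1, st.2.1 ++ [p.2], sign)
  else if st.2.1 ≠ [] then
    (st.1 + st.2.2 * (PySem.Int.ofChars? st.2.1).getD 0, [], st.2.2)
  else st

def calc_without_regex_alt (input : String) : Int :=
  let cs := input.toList
  let st := (PySem.List.enumerate cs).foldl (pvBStep cs) (0, [], 1)
  st.1 + st.2.2 * (PySem.Int.ofChars? st.2.1).getD 0

-- ===== PRECONDITION & SPEC =====
-- Pre_ excludes exactly the inputs on which A raises ValueError: the empty string and any
-- string whose final character is not a digit (there A's final iteration calls int() on an
-- empty or single non-digit slice).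
def Pre_calc_without_regex (input : String) : Prop :=
  input.toList ≠ [] ∧
    PySem.Chars.isdigit (input.toList.getD (input.toList.length - 1) ' ') = true
instance (input : String) : Decidable (Pre_calc_without_regex input) := by
  unfold Pre_calc_without_regex; infer_instance

def pvWitness_calc_without_regex : String := "1 - 2 a3"

def Spec_calc_without_regex (input : String) (out : Int) : Prop := out = calc_without_regex_alt input
instance (input : String) (out : Int) : Decidable (Spec_calc_without_regex input out) := by unfold Spec_calc_without_regex; infer_instance

-- ===== CLAIM (what is proved, stated in full; the proofs are below) =====
def Claim_equal_calc_without_regex : Prop := ∀ (input : String), Dom_calc_without_regex input → Pre_calc_without_regex input → Spec_calc_without_regex input (calc_without_regex input)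

-- ===== LEMMAS AND PROOFS =====

-- A's loop restricted to the indices i, i+1, …, len(cs) (a suffix of range(len+1)).
def pvF (cs : List Char) (i : Nat) (st : Int × Int) : Int × Int :=
  (List.range' i (cs.length + 1 - i)).foldl
    (fun st (k : Nat) => pvAStep cs (cs.length : Int) st (k : Int)) st

-- B's loop restricted to the indices i, …, len(cs) - 1, and its final flush.
def pvG (cs : List Char) (i : Nat) (st : Int × List Char × Int) : Int × List Char × Int :=
  (List.range' i (cs.length - i)).foldl
    (fun st (k : Nat) => pvBStep cs st ((k : Int), cs.getD k ' ')) st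

def pvGdone (st : Int × List Char × Int) : Int :=
  st.1 + st.2.2 * (PySem.Int.ofChars? st.2.1).getD 0

-- The sign A computes when flushing the run that started at s (and B at that run's start).
def pvCoef (cs : List Char) (s : Nat) : Int :=
  if (s : Int) > 0 ∧ PySem.List.pyGetD cs ((s : Int) - 1) ' ' = '-' then -1 else 1

-- The signed value A adds when it flushes the run that started at s at position j.
def pvVal (cs : List Char) (s j : Nat) : Int :=
  pvCoef cs s * (PySem.Int.ofChars? (PySem.List.slice cs (some (s : Int)) (some (j : Int)))).getD 0

lemma pvF_step (cs : List Char) {i : Nat} (h : i ≤ cs.length) (st : Int × Int) :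
    pvF cs i st = pvF cs (i + 1) (pvAStep cs (cs.length : Int) st (i : Int)) := by
  unfold pvF
  have hc : cs.length + 1 - i = (cs.length + 1 - (i + 1)) + 1 := by omega
  rw [hc, List.range'_succ]
  rfl

lemma pvF_last (cs : List Char) (st : Int × Int) : pvF cs (cs.length + 1) st = st := by
  unfold pvF
  simp

lemma pvG_step (cs : List Char) {i : Nat} (h : i < cs.length) (st : Int × List Char × Int) :
    pvG cs i st = pvG cs (i + 1) (pvBStep cs st ((i : Int), cs.getD i ' ')) := by
  unfold pvG
  have hc : cs.length - i = (cs.length - (i + 1)) + 1 := by omega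
  rw [hc, List.range'_succ]
  rfl

lemma pvG_last (cs : List Char) {i : Nat} (h : ¬ i < cs.length) (st : Int × List Char × Int) :
    pvG cs i st = st := by
  unfold pvG
  have hc : cs.length - i = 0 := by omega
  rw [hc]
  rfl

-- Evaluations of A's loop body in the four reachable configurations.
lemma pvAStep_enter (cs : List Char) {i : Nat} (h : i < cs.length)
    (hd : PySem.Chars.isdigit (cs.getD i ' ') = true) (t : Int) :
    pvAStep cs (cs.length : Int) (t, -1) (i : Int) = (t, (i : Int)) := by
  unfold pvAStep
  simp only [PySem.List.pyGetD_natCast]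
  rw [if_pos ⟨by exact_mod_cast h, hd, by trivial⟩]

lemma pvAStep_skip (cs : List Char) {i : Nat} (h : i < cs.length)
    (hd : ¬ PySem.Chars.isdigit (cs.getD i ' ') = true) (t : Int) :
    pvAStep cs (cs.length : Int) (t, -1) (i : Int) = (t, -1) := by
  unfold pvAStep
  simp only [PySem.List.pyGetD_natCast]
  rw [if_neg (fun hcon => hd hcon.2.1),
      if_neg (fun hcon => by
        rcases hcon with hcon | hcon
        · have : i = cs.length := by exact_mod_cast hcon
          omega
        · exact hcon.1 (by trivial))]

lemma pvAStep_stay (cs : List Char) {i : Nat} (h : i < cs.length)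
    (hd : PySem.Chars.isdigit (cs.getD i ' ') = true) (s : Nat) (t : Int) :
    pvAStep cs (cs.length : Int) (t, (s : Int)) (i : Int) = (t, (s : Int)) := by
  unfold pvAStep
  simp only [PySem.List.pyGetD_natCast]
  rw [if_neg (fun hcon => by have h3 := hcon.2.2; omega),
      if_neg (fun hcon => by
        rcases hcon with hcon | hcon
        · have : i = cs.length := by exact_mod_cast hcon
          omega
        · exact hcon.2 hd)]

lemma pvAStep_flush (cs : List Char) {i : Nat} (_hle : i ≤ cs.length)
    (hc : i = cs.length ∨ ¬ PySem.Chars.isdigit (cs.getD i ' ') = true) (s : Nat) (t : Int) :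
    pvAStep cs (cs.length : Int) (t, (s : Int)) (i : Int) = (t + pvVal cs s i, -1) := by
  unfold pvAStep pvVal pvCoef
  simp only [PySem.List.pyGetD_natCast]
  rw [if_neg (fun hcon => by
        rcases hc with hc2 | hc2
        · have h3 := hcon.1; omega
        · exact hc2 hcon.2.1),
      if_pos (by
        rcases hc with hc2 | hc2
        · exact Or.inl (by exact_mod_cast hc2)
        · exact Or.inr ⟨by omega, hc2⟩)]

-- Evaluations of B's loop body in the four reachable configurations.
lemma pvBStep_enter (cs : List Char) {i : Nat}
    (hd : PySem.Chars.isdigit (cs.getD i ' ') = true) (t g : Int) :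
    pvBStep cs (t, [], g) ((i : Int), cs.getD i ' ') = (t, [cs.getD i ' '], pvCoef cs i) := by
  unfold pvBStep pvCoef
  rw [if_pos hd]
  simp

lemma pvBStep_grow (cs : List Char) {i : Nat} {buf : List Char}
    (hd : PySem.Chars.isdigit (cs.getD i ' ') = true) (hbuf : buf ≠ []) (t g : Int) :
    pvBStep cs (t, buf, g) ((i : Int), cs.getD i ' ') = (t, buf ++ [cs.getD i ' '], g) := by
  unfold pvBStep
  rw [if_pos hd]
  simp [hbuf]

lemma pvBStep_flush (cs : List Char) {i : Nat} {buf : List Char}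
    (hd : ¬ PySem.Chars.isdigit (cs.getD i ' ') = true) (hbuf : buf ≠ []) (t g : Int) :
    pvBStep cs (t, buf, g) ((i : Int), cs.getD i ' ')
      = (t + g * (PySem.Int.ofChars? buf).getD 0, [], g) := by
  unfold pvBStep
  rw [if_neg hd, if_pos hbuf]

lemma pvBStep_idle (cs : List Char) {i : Nat}
    (hd : ¬ PySem.Chars.isdigit (cs.getD i ' ') = true) (t g : Int) :
    pvBStep cs (t, [], g) ((i : Int), cs.getD i ' ') = (t, [], g) := by
  unfold pvBStep
  rw [if_neg hd, if_neg (by simp)]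

-- The buffer B carries inside a run is exactly the slice A will flush.
lemma pvTake_snoc (cs : List Char) (s p : Nat) (hsp : s ≤ p) (hp : p < cs.length) :
    (cs.drop s).take (p - s) ++ [cs.getD p ' '] = (cs.drop s).take (p + 1 - s) := by
  have h1 : p + 1 - s = (p - s) + 1 := by omega
  rw [h1, List.take_add_one, List.getElem?_drop]
  have h2 : s + (p - s) = p := by omega
  rw [h2, List.getElem?_eq_getElem hp]
  simp [List.getD_eq_getElem?_getD, List.getElem?_eq_getElem hp]

lemma pvBuf_ne (cs : List Char) (s p : Nat) (h1 : s < p) (h2 : s < cs.length) :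
    (cs.drop s).take (p - s) ≠ [] := by
  apply List.ne_nil_of_length_pos
  simp [List.length_take, List.length_drop]
  omega

lemma pvVal_eq_buf (cs : List Char) (s j : Nat) :
    pvVal cs s j = pvCoef cs s * (PySem.Int.ofChars? ((cs.drop s).take (j - s))).getD 0 := by
  unfold pvVal
  rw [PySem.List.slice_natCast]

-- The main correspondence: from an out-of-run state (start = -1 / empty buffer) at i the two
-- loops compute the same total; from an in-run state (start = s / buffer = the run read so
-- far) they flush the same signed value at the run's end and continue in lockstep.
lemma pvMain (cs : List Char)
    (hlast : PySem.Chars.isdigit (cs.getD (cs.length - 1) ' ') = true) :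
    ∀ k : Nat,
      (∀ (i : Nat) (t g : Int), i < cs.length → cs.length - i = k →
        pvF cs i (t, -1) = (pvGdone (pvG cs i (t, [], g)), -1)) ∧
      (∀ (p s : Nat) (t : Int), s < p → p ≤ cs.length → cs.length - p = k →
        pvF cs p (t, (s : Int)) =
          (pvGdone (pvG cs p (t, (cs.drop s).take (p - s), pvCoef cs s)), -1)) := by
  intro k
  induction k using Nat.strong_induction_on with
  | _ k IH =>
    constructor
    · intro i t g hi hk
      rw [pvF_step cs (le_of_lt hi), pvG_step cs hi]
      by_cases hd : PySem.Chars.isdigit (cs.getD i ' ') = true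
      · rw [pvAStep_enter cs hi hd, pvBStep_enter cs hd]
        have hrec := ((IH (cs.length - (i + 1)) (by omega)).2) (i + 1) i t
          (by omega) (by omega) rfl
        have hb : (cs.drop i).take (i + 1 - i) = [cs.getD i ' '] := by
          rw [show i + 1 - i = 1 by omega, List.drop_eq_getElem_cons hi, List.take_succ_cons,
              List.take_zero, List.getD_eq_getElem?_getD, List.getElem?_eq_getElem hi,
              Option.getD_some]
        rw [hrec, hb]
      · rw [pvAStep_skip cs hi hd, pvBStep_idle cs hd]
        have hne : i + 1 ≠ cs.length := by
          intro hcontra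
          have : i = cs.length - 1 := by omega
          exact hd (this ▸ hlast)
        exact ((IH (cs.length - (i + 1)) (by omega)).1) (i + 1) t g (by omega) rfl
    · intro p s t hsp hp hk
      rcases eq_or_lt_of_le hp with hpe | hplt
      · subst hpe
        rw [pvF_step cs le_rfl, pvAStep_flush cs le_rfl (Or.inl rfl) s t, pvF_last,
            pvG_last cs (by omega), pvVal_eq_buf]
        rfl
      · rw [pvF_step cs hp, pvG_step cs hplt]
        by_cases hd : PySem.Chars.isdigit (cs.getD p ' ') = true
        · rw [pvAStep_stay cs hplt hd,
              pvBStep_grow cs hd (pvBuf_ne cs s p hsp (by omega)) t (pvCoef cs s),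
              pvTake_snoc cs s p (le_of_lt hsp) hplt]
          exact ((IH (cs.length - (p + 1)) (by omega)).2) (p + 1) s t
            (by omega) (by omega) rfl
        · rw [pvAStep_flush cs hp (Or.inr hd) s t,
              pvBStep_flush cs hd (pvBuf_ne cs s p hsp (by omega)) t (pvCoef cs s),
              pvVal_eq_buf]
          have hne : p + 1 ≠ cs.length := by
            intro hcontra
            have : p = cs.length - 1 := by omega
            exact hd (this ▸ hlast)
          exact ((IH (cs.length - (p + 1)) (by omega)).1) (p + 1)
            (t + pvCoef cs s * (PySem.Int.ofChars? ((cs.drop s).take (p - s))).getD 0)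
            (pvCoef cs s) (by omega) rfl
  
-- Port A's fold is pvF at index 0.
lemma pvPortA_eq_pvF (input : String) :
    calc_without_regex input = (pvF input.toList 0 (0, -1)).1 := by
  show ((PySem.List.pyRange 0 (PySem.Str.len input + 1) 1).foldl
          (pvAStep input.toList (PySem.Str.len input)) (0, -1)).1 = _
  unfold pvF
  rw [PySem.Str.len_eq]
  have h1 : ((input.toList.length : Int) + 1) = ((input.toList.length + 1 : Nat) : Int) := by
    push_cast; ring
  rw [h1, PySem.List.pyRange_zero_natCast, List.foldl_map, List.range_eq_range']
  norm_num

-- Port B's fold over enumerate is pvG at index 0, followed by the final flush.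
lemma pvPortB_eq_pvG (input : String) :
    calc_without_regex_alt input = pvGdone (pvG input.toList 0 (0, [], 1)) := by
  show pvGdone ((PySem.List.enumerate input.toList).foldl (pvBStep input.toList) (0, [], 1)) = _
  rw [PySem.List.enumerate_eq_map_pyRange input.toList ' ', PySem.List.len_eq,
      PySem.List.pyRange_zero_natCast, List.foldl_map, List.foldl_map]
  unfold pvG
  rw [List.range_eq_range']
  have hfun : (fun (st : Int × List Char × Int) (k : Nat) =>
        pvBStep input.toList st ((k : Int), PySem.List.pyGetD input.toList (k : Int) ' '))
      = (fun st (k : Nat) => pvBStep input.toList st ((k : Int), input.toList.getD k ' ')) := by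
    funext st k
    rw [PySem.List.pyGetD_natCast]
  rw [hfun]
  norm_num

theorem pv_ports_agree (input : String) (hpre : Pre_calc_without_regex input) :
    calc_without_regex input = calc_without_regex_alt input := by
  obtain ⟨hne, hlast⟩ := hpre
  have hlen : 0 < input.toList.length := List.length_pos_of_ne_nil hne
  rw [pvPortA_eq_pvF, pvPortB_eq_pvG]
  rw [(pvMain input.toList hlast input.toList.length).1 0 0 1 hlen (by omega)]

-- ===== VERDICT (by name: the statement is the Claim_ definition above) =====
theorem calc_without_regex_spec : Claim_equal_calc_without_regex := by
  intro input _ hpre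
  unfold Spec_calc_without_regex
  exact pv_ports_agree input hpre
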